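-- pv_equiv track=rewrite | github.com/cookb7/cs362_group5 | task.py | dec_conversion
-- ===== SOURCE A (Python) =====
-- def dec_conversion(num_list, num_int):
--     for char in range(len(num_list)):
--         # un allowed characters for base 10 conversions
--         if ord(num_list[char]) < 46 or ord(num_list[char]) > 57 or ord(num_list[char]) == 47:
--             return None
--         elif ord(num_list[char]) == 46:
--             continue
--         else:
--             # convert each number to ordinal subtract 48 to get int and add to num_int
--             digit_val = ord(num_list[char]) - 48
--             num_int = num_int * 10 + digit_val
--     return num_int
-- ===== SOURCE B (Python) =====
-- def dec_conversion(num_list, num_int):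
--     # Gather the digit values first, then combine once with positional powers of ten
--     # (no Horner accumulator).
--     digits = []
--     for ch in num_list:
--         o = ord(ch)
--         if o < 46 or o == 47 or o > 57:
--             return None
--         if o != 46:
--             digits.append(o - 48)
--     n = len(digits)
--     return num_int * 10 ** n + sum(d * 10 ** (n - 1 - i) for i, d in enumerate(digits))
-- ===== Notes on version B (the rewrite author's own statement) =====
-- stated objective: alternative
-- what changed: Replaces A's left-to-right Horner fold (acc = acc*10 + digit) with a gather-then-combine decomposition: collect the digit values in one validation pass, then compute num_int * 10**n plus a positional sum of digit * 10**(n-1-i) in a single closed-form combine.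
import Mathlib
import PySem

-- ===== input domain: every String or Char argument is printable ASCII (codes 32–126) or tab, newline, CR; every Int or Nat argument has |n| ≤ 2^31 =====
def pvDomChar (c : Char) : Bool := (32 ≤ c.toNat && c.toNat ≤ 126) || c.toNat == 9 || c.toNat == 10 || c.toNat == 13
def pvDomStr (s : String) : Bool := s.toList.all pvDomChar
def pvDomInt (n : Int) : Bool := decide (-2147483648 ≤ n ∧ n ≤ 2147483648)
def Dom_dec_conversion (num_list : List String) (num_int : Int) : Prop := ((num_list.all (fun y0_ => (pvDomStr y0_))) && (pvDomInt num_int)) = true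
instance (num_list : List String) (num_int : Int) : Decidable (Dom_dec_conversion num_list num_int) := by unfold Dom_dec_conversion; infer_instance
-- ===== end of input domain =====

-- B changes A's left-to-right Horner fold into gather-the-digits then one closed-form
-- combine with positional powers of ten; same O(n) cost (objective: alternative).
-- A mutates nothing; equivalence is about the return value.

-- ===== PORT A =====
-- ord(s) for a single-character string; exact whenever s has length 1
-- (Python's ord raises TypeError otherwise — such calls are excluded by Pre_).
def pvOrd (s : String) : Int := ((s.toList.headD ' ').toNat : Int)

-- the for-loop of A: Horner accumulation with early return None
def pvALoop : List String → Int → Option Int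
  | [], num_int => some num_int
  | s :: rest, num_int =>
    if pvOrd s < 46 ∨ pvOrd s > 57 ∨ pvOrd s = 47 then none
    else if pvOrd s = 46 then pvALoop rest num_int
    else pvALoop rest (num_int * 10 + (pvOrd s - 48))

def dec_conversion (num_list : List String) (num_int : Int) : Option Int :=
  pvALoop num_list num_int

-- ===== PORT B =====
-- the for-loop of B: validate and collect the digit values, early return none
def pvGather : List String → Option (List Int)
  | [] => some []
  | s :: rest =>
    let o := pvOrd s
    if o < 46 ∨ o = 47 ∨ o > 57 then none
    else if o ≠ 46 then (pvGather rest).map (fun ds => (o - 48) :: ds)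
    else pvGather rest

-- sum(d * 10**(n-1-i) for i, d in enumerate(digits)) with n = digits.length
def pvPosSum (ds : List Int) : Int :=
  ((ds.zipIdx.map (fun di => di.1 * 10 ^ (ds.length - 1 - di.2))).sum)

def dec_conversion_alt (num_list : List String) (num_int : Int) : Option Int :=
  match pvGather num_list with
  | none => none
  | some ds => some (num_int * 10 ^ ds.length + pvPosSum ds)

-- ===== PRECONDITION & SPEC =====
-- Pre_ excludes exactly the lists where the scan reaches a string that is not a single
-- character before any invalid single character: Python's ord raises TypeError there.
def Pre_dec_conversion (num_list : List String) (num_int : Int) : Prop :=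
  ∀ i < num_list.length, (num_list.getD i "").toList.length ≠ 1 →
    ∃ j < i, (num_list.getD j "").toList.length = 1 ∧
      (pvOrd (num_list.getD j "") < 46 ∨ pvOrd (num_list.getD j "") = 47 ∨
        pvOrd (num_list.getD j "") > 57)
instance (num_list : List String) (num_int : Int) : Decidable (Pre_dec_conversion num_list num_int) := by unfold Pre_dec_conversion; infer_instance

def pvWitness_dec_conversion : List String × Int := (["4", ".", "2"], 7)

def Spec_dec_conversion (num_list : List String) (num_int : Int) (out : Option Int) : Prop := out = dec_conversion_alt num_list num_int
instance (num_list : List String) (num_int : Int) (out : Option Int) : Decidable (Spec_dec_conversion num_list num_int out) := by unfold Spec_dec_conversion; infer_instance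

-- ===== CLAIM (what is proved, stated in full; the proofs are below) =====
def Claim_equal_dec_conversion : Prop := ∀ (num_list : List String) (num_int : Int), Dom_dec_conversion num_list num_int → Pre_dec_conversion num_list num_int → Spec_dec_conversion num_list num_int (dec_conversion num_list num_int)

-- ===== LEMMAS AND PROOFS =====

-- shifting the enumeration index by one shifts the exponent by one
theorem pvPosSum_shift (ds : List Int) (k m : Nat) :
    ((ds.zipIdx k).map (fun di => di.1 * 10 ^ (m - di.2))).sum
      = ((ds.zipIdx (k + 1)).map (fun di => di.1 * 10 ^ (m + 1 - di.2))).sum := by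
  induction ds generalizing k with
  | nil => simp
  | cons d ds ih =>
    simp only [List.zipIdx_cons, List.map_cons, List.sum_cons, ih (k + 1)]
    have : m + 1 - (k + 1) = m - k := by omega
    rw [this]

-- peeling the leading digit off the positional sum
theorem pvPosSum_cons (d : Int) (ds : List Int) :
    pvPosSum (d :: ds) = d * 10 ^ ds.length + pvPosSum ds := by
  cases ds with
  | nil => simp [pvPosSum]
  | cons e es =>
    unfold pvPosSum
    rw [List.zipIdx_cons, List.map_cons, List.sum_cons]
    have h1 : (d :: e :: es).length - 1 - 0 = (e :: es).length := by simp
    have h2 : (fun di : Int × Nat => di.1 * 10 ^ ((d :: e :: es).length - 1 - di.2))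
        = (fun di : Int × Nat => di.1 * 10 ^ (es.length + 1 - di.2)) := by
      funext di
      have h : (d :: e :: es).length - 1 - di.2 = es.length + 1 - di.2 := by
        simp
      rw [h]
    have h3 : (fun di : Int × Nat => di.1 * 10 ^ ((e :: es).length - 1 - di.2))
        = (fun di : Int × Nat => di.1 * 10 ^ (es.length - di.2)) := by
      funext di
      have h : (e :: es).length - 1 - di.2 = es.length - di.2 := by simp
      rw [h]
    rw [h1, h2, h3, pvPosSum_shift (e :: es) 0 es.length]

-- main invariant: Horner with accumulator acc equals gather-then-positional-combine
theorem pvLoop_agree (lst : List String) (acc : Int) :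
    pvALoop lst acc =
      match pvGather lst with
      | none => none
      | some ds => some (acc * 10 ^ ds.length + pvPosSum ds) := by
  induction lst generalizing acc with
  | nil => simp [pvALoop, pvGather, pvPosSum]
  | cons s rest ih =>
    by_cases hbad : pvOrd s < 46 ∨ pvOrd s = 47 ∨ pvOrd s > 57
    · have hbadA : pvOrd s < 46 ∨ pvOrd s > 57 ∨ pvOrd s = 47 := by tauto
      simp [pvALoop, pvGather, hbadA, hbad]
    · have hbadA : ¬(pvOrd s < 46 ∨ pvOrd s > 57 ∨ pvOrd s = 47) := by tauto
      by_cases hdot : pvOrd s = 46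
      · simp [pvALoop, pvGather, hdot, ih]
      · cases hG : pvGather rest with
        | none =>
          have hA := ih (acc * 10 + (pvOrd s - 48))
          rw [hG] at hA
          simp [pvALoop, pvGather, hbadA, hbad, hdot, hG, hA]
        | some ds =>
          have hA := ih (acc * 10 + (pvOrd s - 48))
          rw [hG] at hA
          simp [pvALoop, pvGather, hbadA, hbad, hdot, hG, hA, pvPosSum_cons]
          ring

-- ===== VERDICT (by name: the statement is the Claim_ definition above) =====
theorem dec_conversion_spec : Claim_equal_dec_conversion := by
  intro num_list num_int _ _
  unfold Spec_dec_conversion dec_conversion dec_conversion_alt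
  rw [pvLoop_agree]
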